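-- pv_equiv track=rewrite | github.com/hyo-nu/Algorithm_Training | SWEA/D2/1959. 두 개의 숫자열/두 개의 숫자열.py | list_mul
-- ===== SOURCE A (Python) =====
-- def list_mul(A_lst,B_lst):
--
--     if len(A_lst) < len(B_lst) :
--         A_lst, B_lst = B_lst, A_lst
--
--     sum_lst = []
--
--     for AB in range(len(A_lst)-len(B_lst)+1):
--         sums = 0
--         for B in range(len(B_lst)):
--             sums += A_lst[AB + B] * B_lst[B]
--         sum_lst.append(sums)
--     return sum_lst
-- ===== SOURCE B (Python) =====
-- def list_mul(A_lst, B_lst):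
--     # Alternative decomposition: transpose the two loops — sweep B once and
--     # accumulate b * (window of A) into the whole output vector with zip.
--     if len(A_lst) < len(B_lst):
--         A_lst, B_lst = B_lst, A_lst
--     n = len(A_lst) - len(B_lst) + 1
--     out = [0] * n
--     for j, b in enumerate(B_lst):
--         out = [s + a * b for s, a in zip(out, A_lst[j:j + n])]
--     return out
-- ===== Notes on version B (the rewrite author's own statement) =====
-- stated objective: alternative
-- what changed: A computes each window's dot product with an inner scan over B; B transposes the loops: it sweeps B once and, for each coefficient b, accumulates b times the corresponding shifted window of A into the whole output vector via zip.
import Mathlib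
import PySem

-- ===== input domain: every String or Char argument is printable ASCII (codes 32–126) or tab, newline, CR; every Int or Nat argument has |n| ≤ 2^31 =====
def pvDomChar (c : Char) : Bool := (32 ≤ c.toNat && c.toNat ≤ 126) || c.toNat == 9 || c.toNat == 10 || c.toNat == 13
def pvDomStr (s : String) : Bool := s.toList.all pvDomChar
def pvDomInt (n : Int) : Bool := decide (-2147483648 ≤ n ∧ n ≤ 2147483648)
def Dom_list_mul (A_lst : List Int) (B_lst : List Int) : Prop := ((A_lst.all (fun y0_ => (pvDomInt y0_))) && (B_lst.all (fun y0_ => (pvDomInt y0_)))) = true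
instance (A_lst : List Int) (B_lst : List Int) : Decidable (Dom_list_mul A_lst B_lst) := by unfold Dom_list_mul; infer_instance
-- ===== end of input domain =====

-- B replaces A's per-window inner dot-product loop by a single sweep over B that
-- accumulates b * (shifted window of A) into the whole output vector (alternative
-- decomposition; same exact results).

-- ===== PORT A =====
def list_mul (A_lst : List Int) (B_lst : List Int) : List Int :=
  let p := if A_lst.length < B_lst.length then (B_lst, A_lst) else (A_lst, B_lst)
  (PySem.List.pyRange 0 ((p.1.length : Int) - (p.2.length : Int) + 1) 1).foldl
    (fun sum_lst AB =>
      sum_lst ++ [(PySem.List.pyRange 0 (p.2.length : Int) 1).foldl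
        (fun sums j => sums + PySem.List.pyGetD p.1 (AB + j) 0 * PySem.List.pyGetD p.2 j 0) 0]) []

-- ===== PORT B =====
def list_mul_alt (A_lst : List Int) (B_lst : List Int) : List Int :=
  let p := if A_lst.length < B_lst.length then (B_lst, A_lst) else (A_lst, B_lst)
  let n : Int := (p.1.length : Int) - (p.2.length : Int) + 1
  (PySem.List.enumerate p.2 0).foldl
    (fun out jb =>
      (out.zip (PySem.List.slice p.1 (some jb.1) (some (jb.1 + n)))).map
        (fun sa => sa.1 + sa.2 * jb.2))
    (List.replicate n.toNat 0)

-- ===== PRECONDITION & SPEC =====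
def Spec_list_mul (A_lst : List Int) (B_lst : List Int) (out : List Int) : Prop := out = list_mul_alt A_lst B_lst
instance (A_lst : List Int) (B_lst : List Int) (out : List Int) : Decidable (Spec_list_mul A_lst B_lst out) := by unfold Spec_list_mul; infer_instance

-- ===== CLAIM (what is proved, stated in full; the proofs are below) =====
def Claim_equal_list_mul : Prop := ∀ (A_lst : List Int) (B_lst : List Int), Dom_list_mul A_lst B_lst → Spec_list_mul A_lst B_lst (list_mul A_lst B_lst)

-- ===== LEMMAS AND PROOFS =====

-- remaining dot product: sum of A[i+j]·bs[t] for bs a suffix of B starting at index j0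
def dotFrom (A : List Int) (i : Nat) : List Int → Nat → Int
  | [], _ => 0
  | b :: bs, j => A.getD (i + j) 0 * b + dotFrom A i bs (j + 1)

theorem list_eq_map_getD_range (xs : List Int) :
    xs = (List.range xs.length).map (fun i => xs.getD i 0) := by
  apply List.ext_getElem (by simp)
  intro i h1 h2
  simp [List.getD_eq_getElem?_getD, List.getElem?_eq_getElem h1]

theorem innerA_eq_dotFrom (A B : List Int) (k : Nat) :
    ∀ (bs : List Int) (j0 : Nat) (s : Int), bs = B.drop j0 →
      (PySem.List.pyRange (j0 : Int) (B.length : Int) 1).foldl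
        (fun sums j => sums + PySem.List.pyGetD A ((k : Int) + j) 0 * PySem.List.pyGetD B j 0) s
      = s + dotFrom A k bs j0 := by
  intro bs
  induction bs with
  | nil =>
    intro j0 s h
    have hK : B.length ≤ j0 := by
      by_contra hc
      have := List.drop_eq_nil_iff.mp h.symm
      omega
    rw [PySem.List.pyRange_one_eq_nil (by exact_mod_cast hK)]
    simp [dotFrom]
  | cons b bs ih =>
    intro j0 s h
    have hj0 : j0 < B.length := by
      by_contra hc
      rw [List.drop_eq_nil_iff.mpr (by omega)] at h
      exact absurd h (by simp)
    have hb : B.getD j0 0 = b := by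
      have : B[j0]? = (B.drop j0)[0]? := by simp [List.getElem?_drop]
      rw [← h] at this
      simp [List.getD_eq_getElem?_getD, this]
    rw [PySem.List.pyRange_one_cons (by exact_mod_cast hj0)]
    simp only [List.foldl_cons]
    have hcast : (j0 : Int) + 1 = ((j0 + 1 : Nat) : Int) := by push_cast; ring
    rw [hcast, ih (j0 + 1) _ (by rw [← List.drop_drop]; rw [← h]; simp)]
    have hidx : (k : Int) + (j0 : Int) = ((k + j0 : Nat) : Int) := by push_cast; ring
    rw [hidx]
    simp only [PySem.List.pyGetD_natCast, hb, dotFrom]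
    ring

theorem loopB_spec (A B : List Int) (nn : Nat)
    (hnn : nn + B.length = A.length + 1) :
    ∀ (bs : List Int) (j0 : Nat) (out : List Int), out.length = nn →
      j0 + bs.length ≤ B.length →
      (PySem.List.enumerate bs (j0 : Int)).foldl
        (fun out jb =>
          (out.zip (PySem.List.slice A (some jb.1) (some (jb.1 + (nn : Int))))).map
            (fun sa => sa.1 + sa.2 * jb.2)) out
      = (List.range nn).map (fun i => out.getD i 0 + dotFrom A i bs j0) := by
  intro bs
  induction bs with
  | nil =>
    intro j0 out hlen _
    simp only [PySem.List.enumerate_nil, List.foldl_nil, dotFrom]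
    rw [← hlen]
    have := list_eq_map_getD_range out
    simpa using this
  | cons b bs ih =>
    intro j0 out hlen hle
    simp only [PySem.List.enumerate_cons, List.foldl_cons]
    have hcast : (j0 : Int) + 1 = ((j0 + 1 : Nat) : Int) := by push_cast; ring
    rw [PySem.List.slice_natCast_add]
    set out' := (out.zip ((A.drop j0).take nn)).map (fun sa => sa.1 + sa.2 * b) with hout'
    have hNj : nn ≤ A.length - j0 := by simp at hle; omega
    have hlen' : out'.length = nn := by
      simp [hout', hlen]
      omega
    rw [hcast, ih (j0 + 1) out' hlen' (by simp at hle ⊢; omega)]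
    apply List.map_congr_left
    intro i hi
    have hi' : i < nn := List.mem_range.mp hi
    have hgd : out'.getD i 0 = out.getD i 0 + A.getD (j0 + i) 0 * b := by
      have hiz : i < (out.zip ((A.drop j0).take nn)).length := by
        simp [hlen]; omega
      have hio : i < out.length := by omega
      have hiA : j0 + i < A.length := by simp at hle; omega
      rw [List.getD_eq_getElem?_getD, List.getElem?_map, List.getElem?_eq_getElem hiz]
      simp only [Option.map_some, Option.getD_some, List.getElem_zip, List.getElem_take,
        List.getElem_drop]
      rw [List.getD_eq_getElem?_getD, List.getElem?_eq_getElem hio,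
        List.getD_eq_getElem?_getD, List.getElem?_eq_getElem hiA]
      simp
    rw [hgd]
    simp only [dotFrom]
    have : i + j0 = j0 + i := by omega
    rw [this]
    ring

-- core: for the post-swap pair (B no longer than A) the two loop structures agree
theorem core (A B : List Int) (hK : B.length ≤ A.length) :
    (PySem.List.pyRange 0 ((A.length : Int) - (B.length : Int) + 1) 1).foldl
      (fun sum_lst AB =>
        sum_lst ++ [(PySem.List.pyRange 0 (B.length : Int) 1).foldl
          (fun sums j => sums + PySem.List.pyGetD A (AB + j) 0 * PySem.List.pyGetD B j 0) 0]) []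
    = (PySem.List.enumerate B 0).foldl
        (fun out jb =>
          (out.zip (PySem.List.slice A (some jb.1) (some (jb.1 + ((A.length : Int) - (B.length : Int) + 1))))).map
            (fun sa => sa.1 + sa.2 * jb.2))
        (List.replicate ((A.length : Int) - (B.length : Int) + 1).toNat 0) := by
  set nn : Nat := A.length - B.length + 1 with hnndef
  have hnn : ((A.length : Int) - (B.length : Int) + 1) = (nn : Int) := by omega
  have hplus : nn + B.length = A.length + 1 := by omega
  rw [hnn]
  simp only [Int.toNat_natCast]
  have hB := loopB_spec A B nn hplus B 0 (List.replicate nn 0) (by simp) (by omega)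
  simp only [Nat.cast_zero] at hB
  rw [hB]
  have hrepl : (List.range nn).map (fun i => (List.replicate nn (0:Int)).getD i 0 + dotFrom A i B 0)
      = (List.range nn).map (fun i => dotFrom A i B 0) := by
    apply List.map_congr_left
    intro i hi
    have hi' : i < nn := List.mem_range.mp hi
    simp [List.getD_eq_getElem?_getD, hi']
  rw [hrepl]
  have hA : ∀ m : Nat, m ≤ nn →
      (PySem.List.pyRange 0 ((m : Nat) : Int) 1).foldl
        (fun sum_lst AB =>
          sum_lst ++ [(PySem.List.pyRange 0 (B.length : Int) 1).foldl
            (fun sums j => sums + PySem.List.pyGetD A (AB + j) 0 * PySem.List.pyGetD B j 0) 0]) []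
      = (List.range m).map (fun i => dotFrom A i B 0) := by
    intro m hm
    induction m with
    | zero => simp [PySem.List.pyRange_one_eq_nil]
    | succ m ihm =>
      rw [show ((m + 1 : Nat) : Int) = ((m : Nat) : Int) + 1 by push_cast; ring,
        PySem.List.pyRange_one_succ_right (by positivity), List.foldl_append,
        ihm (by omega), List.range_succ, List.map_append]
      simp only [List.foldl_cons, List.foldl_nil, List.map_cons, List.map_nil]
      congr 2
      have := innerA_eq_dotFrom A B m B 0 0 (by simp)
      simp only [Nat.cast_zero] at this
      rw [this]
      ring
  exact hA nn le_rfl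

-- ===== VERDICT (by name: the statement is the Claim_ definition above) =====
theorem list_mul_spec : Claim_equal_list_mul := by
  intro A_lst B_lst _
  unfold Spec_list_mul list_mul list_mul_alt
  by_cases h : A_lst.length < B_lst.length
  · simp only [h, if_pos]
    exact core B_lst A_lst (by omega)
  · simp only [h, if_false]
    exact core A_lst B_lst (by omega)
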